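-- pv_equiv track=rewrite | github.com/DaikiSekiguchi/Sphere-Packing | Sphere.py | vector_composite
-- ===== SOURCE A (Python) =====
-- def vector_composite(vectors):
--     """
--     ベクトルを合成し合成ベクトルを計算する。
--     :param vectors: ベクトルを格納しているリスト。
--     :return: 合成ベクトル
--     """
--     vector_x = 0
--     vector_y = 0
--     vector_z = 0
--
--     for vector in vectors:
--         vector_x = vector_x + vector[0]
--         vector_y = vector_y + vector[1]
--         vector_z = vector_z + vector[2]
--
--     return [vector_x, vector_y, vector_z]
-- ===== SOURCE B (Python) =====
-- def vector_composite(vectors):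
--     return [sum(v[0] for v in vectors),
--             sum(v[1] for v in vectors),
--             sum(v[2] for v in vectors)]
-- ===== Notes on version B (the rewrite author's own statement) =====
-- stated objective: simpler
-- what changed: Replaces the single fused loop maintaining three accumulators with three independent per-axis passes, each a sum over a generator.
import Mathlib
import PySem

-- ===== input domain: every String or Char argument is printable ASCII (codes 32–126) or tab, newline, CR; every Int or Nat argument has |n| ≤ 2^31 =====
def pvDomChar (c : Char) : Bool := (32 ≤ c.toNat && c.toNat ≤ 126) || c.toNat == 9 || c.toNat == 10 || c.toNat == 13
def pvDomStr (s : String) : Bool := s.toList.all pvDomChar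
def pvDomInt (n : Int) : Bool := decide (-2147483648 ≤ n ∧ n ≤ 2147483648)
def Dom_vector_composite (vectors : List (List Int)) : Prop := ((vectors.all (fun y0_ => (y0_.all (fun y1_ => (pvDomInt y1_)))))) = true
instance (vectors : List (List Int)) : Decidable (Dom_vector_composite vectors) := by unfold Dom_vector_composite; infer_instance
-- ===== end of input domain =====

-- B sums each axis in its own independent pass instead of A's single fused loop over three accumulators (objective: simpler).

-- ===== PORT A =====
-- A: one loop accumulating (x, y, z); v[k] ported as pyGetD _ k 0 (exact inside Pre_, where every index is in range).
def vector_composite (vectors : List (List Int)) : List Int :=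
  let s := vectors.foldl
    (fun (s : Int × Int × Int) v =>
      (s.1 + PySem.List.pyGetD v 0 0, s.2.1 + PySem.List.pyGetD v 1 0, s.2.2 + PySem.List.pyGetD v 2 0))
    (0, 0, 0)
  [s.1, s.2.1, s.2.2]

-- ===== PORT B =====
-- B: three independent per-axis sums.
def vector_composite_alt (vectors : List (List Int)) : List Int :=
  [ (vectors.map (fun v => PySem.List.pyGetD v 0 0)).sum
  , (vectors.map (fun v => PySem.List.pyGetD v 1 0)).sum
  , (vectors.map (fun v => PySem.List.pyGetD v 2 0)).sum ]

-- ===== PRECONDITION & SPEC =====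
-- Pre_ excludes vectors shorter than 3, where both Pythons raise IndexError.
def Pre_vector_composite (vectors : List (List Int)) : Prop :=
  ∀ v ∈ vectors, 3 ≤ v.length
instance (vectors : List (List Int)) : Decidable (Pre_vector_composite vectors) := by
  unfold Pre_vector_composite; infer_instance

def pvWitness_vector_composite : List (List Int) := [[1, 2, 3], [4, 5, 6]]

def Spec_vector_composite (vectors : List (List Int)) (out : List Int) : Prop := out = vector_composite_alt vectors
instance (vectors : List (List Int)) (out : List Int) : Decidable (Spec_vector_composite vectors out) := by unfold Spec_vector_composite; infer_instance

-- ===== CLAIM (what is proved, stated in full; the proofs are below) =====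
def Claim_equal_vector_composite : Prop := ∀ (vectors : List (List Int)), Dom_vector_composite vectors → Pre_vector_composite vectors → Spec_vector_composite vectors (vector_composite vectors)

-- ===== LEMMAS AND PROOFS =====
theorem vc_foldl (vectors : List (List Int)) : ∀ (a b c : Int),
    vectors.foldl
      (fun (s : Int × Int × Int) v =>
        (s.1 + PySem.List.pyGetD v 0 0, s.2.1 + PySem.List.pyGetD v 1 0, s.2.2 + PySem.List.pyGetD v 2 0))
      (a, b, c)
    = (a + (vectors.map (fun v => PySem.List.pyGetD v 0 0)).sum,
       b + (vectors.map (fun v => PySem.List.pyGetD v 1 0)).sum,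
       c + (vectors.map (fun v => PySem.List.pyGetD v 2 0)).sum) := by
  induction vectors with
  | nil => simp
  | cons v vs ih =>
    intro a b c
    simp [List.foldl_cons, ih]
    refine ⟨by ring, by ring, by ring⟩

-- ===== VERDICT (by name: the statement is the Claim_ definition above) =====
theorem vector_composite_spec : Claim_equal_vector_composite := by
  intro vectors _ _
  show _ = _
  simp [vector_composite, vector_composite_alt, vc_foldl]
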